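-- pv_equiv track=rewrite | github.com/dlwnsgud8406/Programmers | PCCP 기출문제/2. 석유시추.py | solution
-- ===== SOURCE A (Python) =====
-- from collections import deque
--
-- def bfs(land, visited, i, j):
--     cnt = 0
--     m = len(land[0])
--     n = len(land)
--     q = deque()
--     visited.add((i, j))
--     q.append((i, j))
--     while q:
--         ci, cj = q.popleft()
--         for (di, dj) in ((1, 0), (-1, 0), (0, 1), (0, -1)):
--             ni, nj = ci + di, cj + dj
--             if 0 <= ni < n and 0 <= nj < m and (ni, nj) not in visited and land[ni][nj] == 1:
--                 visited.add((ni, nj))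
--                 q.append((ni, nj))
--                 cnt += 1
--     return cnt + 1
--
-- def solution(land):
--     n = len(land)
--     m = len(land[0])
--     answer = 0
--     for i in range(m):
--         total_oil = 0
--         visited = set()
--         for j in range(n):
--             if land[j][i] == 1 and (j, i) not in visited:
--                 total_oil += bfs(land, visited, j, i)
--         answer = max(answer, total_oil)
--
--     return answer
-- ===== SOURCE B (Python) =====
-- def solution(land):
--     n = len(land)
--     m = len(land[0])
--     col = [0] * m
--     seen = set()
--     for r in range(n):
--         for c in range(m):
--             if land[r][c] == 1 and (r, c) not in seen:
--                 seen.add((r, c))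
--                 stack = [(r, c)]
--                 cells = []
--                 while stack:
--                     cr, cc = stack.pop()
--                     cells.append((cr, cc))
--                     for dr, dc in ((1, 0), (-1, 0), (0, 1), (0, -1)):
--                         nr, nc = cr + dr, cc + dc
--                         if 0 <= nr < n and 0 <= nc < m and (nr, nc) not in seen and land[nr][nc] == 1:
--                             seen.add((nr, nc))
--                             stack.append((nr, nc))
--                 size = len(cells)
--                 for ci in set(cc for _, cc in cells):
--                     col[ci] += size
--     return max(col, default=0)
-- ===== Notes on version B (the rewrite author's own statement) =====
-- stated objective: alternative
-- what changed: A re-runs a shared-visited BFS flood fill from scratch for every column (re-traversing a component once per column it spans); B labels each connected component exactly once in a single row-major pass and adds its size to the columns the component touches, taking the maximum column total at the end.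
import Mathlib
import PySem

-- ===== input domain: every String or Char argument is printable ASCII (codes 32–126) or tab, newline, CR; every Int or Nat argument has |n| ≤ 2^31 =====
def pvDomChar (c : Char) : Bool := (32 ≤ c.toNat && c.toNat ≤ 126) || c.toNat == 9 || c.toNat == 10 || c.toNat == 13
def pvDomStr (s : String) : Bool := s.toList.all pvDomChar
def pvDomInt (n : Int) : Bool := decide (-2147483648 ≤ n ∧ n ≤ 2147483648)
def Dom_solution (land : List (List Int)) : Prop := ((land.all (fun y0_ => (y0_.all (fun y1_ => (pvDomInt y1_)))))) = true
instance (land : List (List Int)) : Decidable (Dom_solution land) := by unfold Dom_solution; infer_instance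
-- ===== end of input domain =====

-- B replaces A's per-column repeated BFS flood fills by ONE connected-component labelling pass whose
-- component sizes are accumulated into the columns the component touches; the equivalence proved is
-- about the RETURN value (neither function mutates caller-visible state).

-- helpers shared by both ports: the 4 directions and the (guarded) grid read land[i][j]
def pvDirs : List (Int × Int) := [(1, 0), (-1, 0), (0, 1), (0, -1)]

def pvCell (land : List (List Int)) (i j : Int) : Int :=
  PySem.List.pyGetD (PySem.List.pyGetD land i []) j 0

-- fuel that provably exceeds the number of worklist iterations (`while q:` / `while stack:`);
-- it only makes the loops total, no branch of either Python is guarded by it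
def pvFuel (land : List (List Int)) : Nat :=
  2 * land.length * (PySem.List.pyGetD land 0 []).length + 2

-- ===== PORT A =====
-- the body of bfs's `for (di,dj) in …` loop
def pvAVisit (land : List (List Int)) (n m ci cj : Int)
    (st : PySem.Set (Int × Int) × List (Int × Int) × Int) (d : Int × Int) :
    PySem.Set (Int × Int) × List (Int × Int) × Int :=
  let ni := ci + d.1
  let nj := cj + d.2
  if 0 ≤ ni ∧ ni < n ∧ 0 ≤ nj ∧ nj < m ∧ (ni, nj) ∉ st.1 ∧ pvCell land ni nj = 1 then
    (PySem.Set.add st.1 (ni, nj), st.2.1 ++ [(ni, nj)], st.2.2 + 1)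
  else st

-- `while q:` — state (visited, q, cnt); popleft is taking the head
def pvALoop (land : List (List Int)) (n m : Int) :
    Nat → PySem.Set (Int × Int) → List (Int × Int) → Int → PySem.Set (Int × Int) × Int
  | 0, v, _, cnt => (v, cnt)
  | _ + 1, v, [], cnt => (v, cnt)
  | fuel + 1, v, c :: q, cnt =>
    let st := pvDirs.foldl (pvAVisit land n m c.1 c.2) (v, q, cnt)
    pvALoop land n m fuel st.1 st.2.1 st.2.2

-- bfs(land, visited, i, j): returns (the mutated visited set, cnt + 1)
def pvBfs (land : List (List Int)) (visited : PySem.Set (Int × Int)) (i j : Int) :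
    PySem.Set (Int × Int) × Int :=
  let m := PySem.List.len (PySem.List.pyGetD land 0 [])
  let n := PySem.List.len land
  let v := PySem.Set.add visited (i, j)
  let r := pvALoop land n m (pvFuel land) v [(i, j)] 0
  (r.1, r.2 + 1)

-- the body of solution's `for i in range(m):` — returns (total_oil, visited)
def pvAColumn (land : List (List Int)) (i : Int) : Int × PySem.Set (Int × Int) :=
  (PySem.List.pyRange 0 (PySem.List.len land) 1).foldl (fun st j =>
    if pvCell land j i = 1 ∧ (j, i) ∉ st.2 then
      let r := pvBfs land st.2 j i
      (st.1 + r.2, r.1)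
    else st) (0, PySem.Set.empty)

def solution (land : List (List Int)) : Int :=
  (PySem.List.pyRange 0 (PySem.List.len (PySem.List.pyGetD land 0 [])) 1).foldl
    (fun answer i => max answer (pvAColumn land i).1) 0

-- ===== PORT B =====
-- the body of the flood fill's `for dr,dc in …` loop
def pvBVisit (land : List (List Int)) (n m cr cc : Int)
    (st : PySem.Set (Int × Int) × List (Int × Int)) (d : Int × Int) :
    PySem.Set (Int × Int) × List (Int × Int) :=
  let nr := cr + d.1
  let nc := cc + d.2
  if 0 ≤ nr ∧ nr < n ∧ 0 ≤ nc ∧ nc < m ∧ (nr, nc) ∉ st.1 ∧ pvCell land nr nc = 1 then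
    (PySem.Set.add st.1 (nr, nc), st.2 ++ [(nr, nc)])
  else st

-- `while stack:` — state (seen, stack, cells); stack.pop() pops the LAST element (PySem.List.pop?)
def pvBLoop (land : List (List Int)) (n m : Int) :
    Nat → PySem.Set (Int × Int) → List (Int × Int) → List (Int × Int) →
    PySem.Set (Int × Int) × List (Int × Int)
  | 0, seen, _, cells => (seen, cells)
  | fuel + 1, seen, stack, cells =>
    match PySem.List.pop? stack with
    | none => (seen, cells)
    | some (p, rest) =>
      let cells' := cells ++ [p]
      let st := pvDirs.foldl (pvBVisit land n m p.1 p.2) (seen, rest)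
      pvBLoop land n m fuel st.1 st.2 cells'

-- one component flood fill started at (r, c): returns (seen, cells of the component)
def pvFlood (land : List (List Int)) (n m r c : Int) (seen : PySem.Set (Int × Int)) :
    PySem.Set (Int × Int) × List (Int × Int) :=
  pvBLoop land n m (pvFuel land) (PySem.Set.add seen (r, c)) [(r, c)] []

-- the body of B's `for c in range(m):` — labels the component at (r,c) if new, adds its size to the
-- columns it touches (the additions commute, so the Python set's iteration order cannot matter)
def pvBCellStep (land : List (List Int)) (n m : Int)
    (st : PySem.Set (Int × Int) × List Int) (r c : Int) : PySem.Set (Int × Int) × List Int :=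
  if pvCell land r c = 1 ∧ (r, c) ∉ st.1 then
    let fl := pvFlood land n m r c st.1
    let size : Int := fl.2.length
    let cols : PySem.Set Int := PySem.Set.ofList (fl.2.map (fun u => u.2))
    (fl.1, cols.foldl (fun col ci =>
      PySem.List.pySetD col ci (PySem.List.pyGetD col ci 0 + size)) st.2)
  else st

def solution_alt (land : List (List Int)) : Int :=
  let n := PySem.List.len land
  let m := PySem.List.len (PySem.List.pyGetD land 0 [])
  let fin := (PySem.List.pyRange 0 n 1).foldl (fun st r =>
      (PySem.List.pyRange 0 m 1).foldl (fun st c => pvBCellStep land n m st r c) st)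
    (PySem.Set.empty, List.replicate m.toNat 0)
  PySem.List.maxD fin.2 (fun x => x) 0

-- ===== PRECONDITION & SPEC =====
-- Pre_ excludes exactly the inputs where Python A raises (IndexError): the empty list (land[0])
-- and grids in which some row is shorter than row 0 (land[j][i] is read for every j and i < len(land[0])).
def Pre_solution (land : List (List Int)) : Prop :=
  land ≠ [] ∧ ∀ row ∈ land, (PySem.List.pyGetD land 0 []).length ≤ row.length
instance (land : List (List Int)) : Decidable (Pre_solution land) := by
  unfold Pre_solution; infer_instance

def pvWitness_solution : List (List Int) := [[1, 0], [0, 1]]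

def Spec_solution (land : List (List Int)) (out : Int) : Prop := out = solution_alt land
instance (land : List (List Int)) (out : Int) : Decidable (Spec_solution land out) := by
  unfold Spec_solution; infer_instance

-- ===== CLAIM (what is proved, stated in full; the proofs are below) =====
def Claim_equal_solution : Prop :=
  ∀ (land : List (List Int)), Dom_solution land → Pre_solution land →
    Spec_solution land (solution land)

-- ===== LEMMAS AND PROOFS =====

-- a cell inside the n×m grid
def pvInG (n m : Int) (p : Int × Int) : Prop := 0 ≤ p.1 ∧ p.1 < n ∧ 0 ≤ p.2 ∧ p.2 < m

-- an oil cell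
def pvP (land : List (List Int)) (n m : Int) (p : Int × Int) : Prop :=
  pvInG n m p ∧ pvCell land p.1 p.2 = 1

-- 4-adjacency between oil cells
def pvNbr (land : List (List Int)) (n m : Int) (p q : Int × Int) : Prop :=
  pvP land n m p ∧ pvP land n m q ∧ ∃ d ∈ pvDirs, q = (p.1 + d.1, p.2 + d.2)

-- connectivity of oil cells
def pvConn (land : List (List Int)) (n m : Int) : Int × Int → Int × Int → Prop :=
  Relation.ReflTransGen (pvNbr land n m)

def pvClosed (land : List (List Int)) (n m : Int) (V : List (Int × Int)) : Prop :=
  ∀ x ∈ V, ∀ y, pvNbr land n m x y → y ∈ V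

def pvGood (land : List (List Int)) (n m : Int) (V : List (Int × Int)) : Prop :=
  V.Nodup ∧ (∀ x ∈ V, pvP land n m x) ∧ pvClosed land n m V

-- x is reachable from some oil cell of column i ("drilling column i collects x")
def pvCP (land : List (List Int)) (n m : Int) (i : Int) (x : Int × Int) : Prop :=
  ∃ u : Int × Int, u.2 = i ∧ pvP land n m u ∧ pvConn land n m u x
lemma pvNbr_symm (land : List (List Int)) (n m : Int) : Symmetric (pvNbr land n m) := by
  rintro p q ⟨hp, hq, ⟨d1, d2⟩, hd, rfl⟩
  refine ⟨hq, hp, ⟨-d1, -d2⟩, ?_, ?_⟩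
  · simp only [pvDirs, List.mem_cons, Prod.mk.injEq, List.not_mem_nil, or_false] at hd ⊢
    omega
  · obtain ⟨p1, p2⟩ := p
    simp only [Prod.mk.injEq]
    constructor <;> ring

lemma pvLength_le_grid {n m : Int} {V : List (Int × Int)} (hnd : V.Nodup)
    (h : ∀ p ∈ V, pvInG n m p) : V.length ≤ n.toNat * m.toNat := by
  classical
  set f : Int × Int → Nat × Nat := fun p => (p.1.toNat, p.2.toNat) with hf
  have hmapnd : (V.map f).Nodup := by
    refine List.Nodup.map_on ?_ hnd
    intro x hx y hy hxy
    have hx' := h x hx; have hy' := h y hy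
    simp only [pvInG] at hx' hy'
    simp only [hf, Prod.mk.injEq] at hxy
    have : x.1 = y.1 ∧ x.2 = y.2 := by omega
    exact Prod.ext this.1 this.2
  have hsub : (V.map f).toFinset ⊆ Finset.range n.toNat ×ˢ Finset.range m.toNat := by
    intro a ha
    simp only [List.mem_toFinset, List.mem_map] at ha
    obtain ⟨p, hp, rfl⟩ := ha
    have := h p hp
    simp only [pvInG] at this
    simp only [Finset.mem_product, Finset.mem_range, hf]
    omega
  have := Finset.card_le_card hsub
  rw [List.toFinset_card_of_nodup hmapnd] at this
  simpa using this
lemma pvAVisitFold (land : List (List Int)) (n m : Int) (c : Int × Int) :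
    ∀ (ds : List (Int × Int)) (v : PySem.Set (Int × Int)) (q : List (Int × Int)) (cnt : Int),
      v.Nodup →
      ∃ E, ds.foldl (pvAVisit land n m c.1 c.2) (v, q, cnt) =
            (v ++ E, q ++ E, cnt + E.length) ∧
        (v ++ E).Nodup ∧ (∀ y ∈ E, pvP land n m y ∧ ∃ d ∈ ds, y = (c.1 + d.1, c.2 + d.2)) ∧
        (∀ d ∈ ds, pvP land n m (c.1 + d.1, c.2 + d.2) → (c.1 + d.1, c.2 + d.2) ∈ v ++ E) := by
  intro ds
  induction ds with
  | nil =>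
    intro v q cnt hnd
    exact ⟨[], by simp, by simpa using hnd, by simp, by simp⟩
  | cons d ds ih =>
    intro v q cnt hnd
    set nd : Int × Int := (c.1 + d.1, c.2 + d.2) with hndd
    by_cases hg : 0 ≤ nd.1 ∧ nd.1 < n ∧ 0 ≤ nd.2 ∧ nd.2 < m ∧ nd ∉ v ∧ pvCell land nd.1 nd.2 = 1
    · have hstep : pvAVisit land n m c.1 c.2 (v, q, cnt) d =
          (v ++ [nd], q ++ [nd], cnt + 1) := by
        simp only [pvAVisit, ← hndd]
        rw [if_pos hg]
        simp [PySem.Set.add_of_not_mem hg.2.2.2.2.1]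
      have hnd1 : (v ++ [nd]).Nodup := by
        refine List.Nodup.append hnd (List.nodup_singleton _) ?_
        intro x hx hy
        rw [List.mem_singleton] at hy
        subst hy
        exact hg.2.2.2.2.1 hx
      obtain ⟨E, heq, hnd2, hP, hcov⟩ := ih (v ++ [nd]) (q ++ [nd]) (cnt + 1) hnd1
      refine ⟨nd :: E, ?_, ?_, ?_, ?_⟩
      · rw [List.foldl_cons, hstep, heq]
        refine Prod.ext (by simp) (Prod.ext (by simp) ?_)
        simp only [List.length_cons]
        push_cast
        ring
      · simpa using hnd2
      · intro y hy
        rcases List.mem_cons.mp hy with rfl | hy'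
        · exact ⟨⟨⟨hg.1, hg.2.1, hg.2.2.1, hg.2.2.2.1⟩, hg.2.2.2.2.2⟩, d, by simp, hndd⟩
        · obtain ⟨h1, d', hd', h2⟩ := hP y hy'
          exact ⟨h1, d', by simp [hd'], h2⟩
      · intro d' hd' hP'
        rcases List.mem_cons.mp hd' with rfl | hd''
        · simp [← hndd]
        · have := hcov d' hd'' hP'
          simpa using this
    · have hstep : pvAVisit land n m c.1 c.2 (v, q, cnt) d = (v, q, cnt) := by
        simp only [pvAVisit, ← hndd]
        rw [if_neg hg]
      obtain ⟨E, heq, hnd2, hP, hcov⟩ := ih v q cnt hnd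
      refine ⟨E, by rw [List.foldl_cons, hstep]; exact heq, hnd2, ?_, ?_⟩
      · intro y hy
        obtain ⟨h1, d', hd', h2⟩ := hP y hy
        exact ⟨h1, d', by simp [hd'], h2⟩
      intro d' hd' hP'
      rcases List.mem_cons.mp hd' with rfl | hd''
      · -- guard failed but the cell is an oil cell in range: it must already be in v
        by_cases hv : nd ∈ v
        · exact List.mem_append_left _ hv
        · exfalso
          exact hg ⟨hP'.1.1, hP'.1.2.1, hP'.1.2.2.1, hP'.1.2.2.2, hv, hP'.2⟩
      · exact hcov d' hd'' hP'
lemma pvALoop_spec (land : List (List Int)) (n m : Int) (Q : Int × Int → Prop)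
    (hQc : ∀ x y, Q x → pvNbr land n m x y → Q y) :
    ∀ (fuel : Nat) (v : PySem.Set (Int × Int)) (q : List (Int × Int)) (cnt : Int),
      v.Nodup → (∀ x ∈ q, x ∈ v) → (∀ x ∈ v, pvP land n m x) → (∀ x ∈ v, Q x) →
      (∀ x ∈ v, x ∉ q → ∀ y, pvNbr land n m x y → y ∈ v) →
      q.length + 2 * (n.toNat * m.toNat - v.length) < fuel →
      ∃ Δ, pvALoop land n m fuel v q cnt = (v ++ Δ, cnt + Δ.length) ∧
        (v ++ Δ).Nodup ∧ (∀ x ∈ Δ, pvP land n m x ∧ Q x) ∧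
        pvClosed land n m (v ++ Δ) := by
  intro fuel
  induction fuel with
  | zero => intro v q cnt _ _ _ _ _ hlt; omega
  | succ fuel ih =>
    intro v q cnt hnd hqv hP hQ hcl hlt
    match q with
    | [] =>
      refine ⟨[], by simp [pvALoop], by simpa using hnd, by simp, ?_⟩
      intro x hx y hy
      simp only [List.append_nil] at hx ⊢
      exact hcl x hx (by simp) y hy
    | c :: q' =>
      obtain ⟨E, heq, hndE, hPE, hcov⟩ := pvAVisitFold land n m c pvDirs v q' cnt hnd
      have hcv : c ∈ v := hqv c (by simp)
      have hPc : pvP land n m c := hP c hcv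
      have hQc' : Q c := hQ c hcv
      have hEfresh : ∀ y ∈ E, y ∉ v := by
        intro y hy hyv
        exact List.disjoint_of_nodup_append hndE hyv hy
      -- neighbour facts for the new cells
      have hNbrE : ∀ y ∈ E, pvNbr land n m c y := by
        intro y hy
        obtain ⟨hPy, d, hd, rfl⟩ := hPE y hy
        exact ⟨hPc, hPy, d, hd, rfl⟩
      have hQE : ∀ y ∈ E, Q y := fun y hy => hQc _ _ hQc' (hNbrE y hy)
      have hlen : (v ++ E).length ≤ n.toNat * m.toNat := by
        refine pvLength_le_grid hndE ?_
        intro p hp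
        rcases List.mem_append.mp hp with hp | hp
        · exact (hP p hp).1
        · exact (hPE p hp).1.1
      have hrec := ih (v ++ E) (q' ++ E) (cnt + E.length)
        hndE
        (by
          intro x hx
          rcases List.mem_append.mp hx with hx | hx
          · exact List.mem_append_left _ (hqv x (by simp [hx]))
          · exact List.mem_append_right _ hx)
        (by
          intro x hx
          rcases List.mem_append.mp hx with hx | hx
          · exact hP x hx
          · exact (hPE x hx).1)
        (by
          intro x hx
          rcases List.mem_append.mp hx with hx | hx
          · exact hQ x hx
          · exact hQE x hx)
        (by
          -- closedness except the new queue
          intro x hx hxq y hy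
          rcases List.mem_append.mp hx with hx | hx
          · by_cases hxc : x = c
            · subst hxc
              -- all neighbours of the popped cell are present after the fold
              obtain ⟨_, hPy, d, hd, rfl⟩ := hy
              exact hcov d hd hPy
            · have hxq' : x ∉ q' := fun h => hxq (List.mem_append_left _ h)
              have : x ∉ c :: q' := by
                intro h
                rcases List.mem_cons.mp h with h | h
                · exact hxc h
                · exact hxq' h
              exact List.mem_append_left _ (hcl x hx this y hy)
          · exact absurd (List.mem_append_right q' hx) hxq)
        (by
          simp only [List.length_append, List.length_cons] at hlt hlen ⊢
          omega)
      obtain ⟨Δ, heq2, hnd3, hPQ3, hcl3⟩ := hrec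
      refine ⟨E ++ Δ, ?_, by simpa [List.append_assoc] using hnd3, ?_, ?_⟩
      · show pvALoop land n m (fuel + 1) v (c :: q') cnt = _
        rw [pvALoop]
        simp only [heq]
        rw [heq2]
        refine Prod.ext (by simp) ?_
        simp only [List.length_append]
        push_cast
        ring
      · intro x hx
        rcases List.mem_append.mp hx with hx | hx
        · exact ⟨(hPE x hx).1, hQE x hx⟩
        · exact hPQ3 x hx
      · intro x hx y hy
        rw [← List.append_assoc] at hx ⊢
        exact hcl3 x hx y hy
lemma pvConn_symm (land : List (List Int)) (n m : Int) {p q : Int × Int}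
    (h : pvConn land n m p q) : pvConn land n m q p :=
  Relation.ReflTransGen.symmetric (pvNbr_symm land n m) h

lemma pvP_of_conn {land : List (List Int)} {n m : Int} {p q : Int × Int}
    (h : pvConn land n m p q) (hp : pvP land n m p) : pvP land n m q := by
  induction h with
  | refl => exact hp
  | tail _ h2 _ => exact h2.2.1

lemma pvMem_of_conn {land : List (List Int)} {n m : Int} {V : List (Int × Int)}
    (hc : pvClosed land n m V) {s t : Int × Int} (hs : s ∈ V) (h : pvConn land n m s t) :
    t ∈ V := by
  induction h with
  | refl => exact hs
  | tail _ h2 ih => exact hc _ ih _ h2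

def pvN (land : List (List Int)) : Int := PySem.List.len land
def pvM (land : List (List Int)) : Int := PySem.List.len (PySem.List.pyGetD land 0 [])

lemma pvFuel_big (land : List (List Int)) :
    2 * ((pvN land).toNat * (pvM land).toNat) + 2 ≤ pvFuel land := by
  simp only [pvN, pvM, pvFuel, PySem.List.len, Int.toNat_natCast]
  rw [← Nat.mul_assoc]

lemma pvBfs_spec (land : List (List Int)) (V : PySem.Set (Int × Int)) (a b : Int)
    (hG : pvGood land (pvN land) (pvM land) V)
    (hp : pvP land (pvN land) (pvM land) (a, b)) (hnv : (a, b) ∉ V) :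
    ∃ K : List (Int × Int), pvBfs land V a b = (V ++ K, (K.length : Int)) ∧
      pvGood land (pvN land) (pvM land) (V ++ K) ∧
      (∀ x, x ∈ V ++ K ↔ x ∈ V ∨ pvConn land (pvN land) (pvM land) (a, b) x) := by
  obtain ⟨hnd, hP, hcl⟩ := hG
  set n := pvN land with hn
  set m := pvM land with hm
  have hadd : PySem.Set.add V (a, b) = V ++ [(a, b)] := PySem.Set.add_of_not_mem hnv
  have hnd1 : (V ++ [(a, b)]).Nodup := by
    refine List.Nodup.append hnd (List.nodup_singleton _) ?_
    intro x hx hy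
    rw [List.mem_singleton] at hy
    subst hy
    exact hnv hx
  obtain ⟨Δ, heq, hnd2, hPQ, hcl2⟩ :=
    pvALoop_spec land n m (fun x => x ∈ V ∨ pvConn land n m (a, b) x)
      (by
        rintro x y (hx | hx) hnb
        · exact Or.inl (hcl x hx y hnb)
        · exact Or.inr (hx.tail hnb))
      (pvFuel land) (V ++ [(a, b)]) [(a, b)] 0
      hnd1
      (by intro x hx; simp at hx; simp [hx])
      (by
        intro x hx
        rcases List.mem_append.mp hx with hx | hx
        · exact hP x hx
        · rw [List.mem_singleton] at hx; subst hx; exact hp)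
      (by
        intro x hx
        rcases List.mem_append.mp hx with hx | hx
        · exact Or.inl hx
        · rw [List.mem_singleton] at hx; subst hx
          exact Or.inr Relation.ReflTransGen.refl)
      (by
        intro x hx hxq y hy
        rcases List.mem_append.mp hx with hx | hx
        · exact List.mem_append_left _ (hcl x hx y hy)
        · exact absurd (List.mem_singleton.mpr (List.mem_singleton.mp hx)) hxq)
      (by
        have h1 := pvFuel_big land
        rw [← hn, ← hm] at h1
        have h2 : (V ++ [(a, b)]).length ≤ n.toNat * m.toNat := by
          refine pvLength_le_grid hnd1 ?_
          intro p hp'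
          rcases List.mem_append.mp hp' with hp' | hp'
          · exact (hP p hp').1
          · rw [List.mem_singleton] at hp'; subst hp'; exact hp.1
        simp only [List.length_singleton]
        omega)
  refine ⟨(a, b) :: Δ, ?_, ?_, ?_⟩
  · have heq' : pvALoop land (PySem.List.len land) (PySem.List.len (PySem.List.pyGetD land 0 []))
        (pvFuel land) (V ++ [(a, b)]) [(a, b)] 0 = (V ++ [(a, b)] ++ Δ, 0 + (Δ.length : Int)) := heq
    show pvBfs land V a b = _
    simp only [pvBfs, hadd, heq']
    refine Prod.ext (by simp) ?_
    simp only [List.length_cons]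
    push_cast
    ring
  · refine ⟨by simpa using hnd2, ?_, ?_⟩
    · intro x hx
      rcases List.mem_append.mp hx with hx | hx
      · exact hP x hx
      · rcases List.mem_cons.mp hx with rfl | hx
        · exact hp
        · exact (hPQ x hx).1
    · intro x hx y hy
      have hx' : x ∈ V ++ [(a, b)] ++ Δ := by simpa [List.append_assoc] using hx
      have := hcl2 x hx' y hy
      simpa [List.append_assoc] using this
  · intro x
    constructor
    · intro hx
      rcases List.mem_append.mp hx with hx | hx
      · exact Or.inl hx
      · rcases List.mem_cons.mp hx with rfl | hx
        · exact Or.inr Relation.ReflTransGen.refl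
        · rcases (hPQ x hx).2 with h | h
          · exact Or.inl h
          · exact Or.inr h
    · rintro (hx | hx)
      · exact List.mem_append_left _ hx
      · have hmem : (a, b) ∈ V ++ (a, b) :: Δ := by simp
        have hclosed : pvClosed land n m (V ++ (a, b) :: Δ) := by
          intro z hz y hy
          have hz' : z ∈ V ++ [(a, b)] ++ Δ := by simpa [List.append_assoc] using hz
          have := hcl2 z hz' y hy
          simpa [List.append_assoc] using this
        exact pvMem_of_conn hclosed hmem hx
lemma pvAColFold (land : List (List Int)) (i : Int) (hi : 0 ≤ i ∧ i < pvM land) :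
    ∀ (js : List Int) (t : Int) (V : PySem.Set (Int × Int)),
      pvGood land (pvN land) (pvM land) V → t = (V.length : Int) →
      (∀ j ∈ js, 0 ≤ j ∧ j < pvN land) →
      ∃ Δ, js.foldl (fun st j =>
          if pvCell land j i = 1 ∧ (j, i) ∉ st.2 then
            let r := pvBfs land st.2 j i
            (st.1 + r.2, r.1)
          else st) (t, V) = (t + (Δ.length : Int), V ++ Δ) ∧
        pvGood land (pvN land) (pvM land) (V ++ Δ) ∧
        (∀ x, x ∈ V ++ Δ ↔ x ∈ V ∨ ∃ j ∈ js,
          pvP land (pvN land) (pvM land) (j, i) ∧ pvConn land (pvN land) (pvM land) (j, i) x) := by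
  intro js
  induction js with
  | nil =>
    intro t V hG ht _
    exact ⟨[], by simp [ht], by simpa using hG, by simp⟩
  | cons j js ih =>
    intro t V hG ht hb
    have hj := hb j (by simp)
    by_cases hc : pvCell land j i = 1 ∧ (j, i) ∉ V
    · have hp : pvP land (pvN land) (pvM land) (j, i) := ⟨⟨hj.1, hj.2, hi.1, hi.2⟩, hc.1⟩
      obtain ⟨K, heq, hG2, hmem⟩ := pvBfs_spec land V j i hG hp hc.2
      obtain ⟨Δ, heq2, hG3, hmem3⟩ := ih (t + (K.length : Int)) (V ++ K) hG2
        (by simp [ht]) (fun j' hj' => hb j' (by simp [hj']))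
      refine ⟨K ++ Δ, ?_, by simpa [List.append_assoc] using hG3, ?_⟩
      · rw [List.foldl_cons, if_pos hc]
        simp only [heq, heq2]
        refine Prod.ext ?_ (by simp)
        simp only [List.length_append]
        push_cast
        ring
      · intro x
        rw [← List.append_assoc]
        rw [hmem3 x]
        constructor
        · rintro (hx | ⟨j', hj', h1, h2⟩)
          · rcases (hmem x).mp hx with hx | hx
            · exact Or.inl hx
            · exact Or.inr ⟨j, by simp, hp, hx⟩
          · exact Or.inr ⟨j', by simp [hj'], h1, h2⟩
        · rintro (hx | ⟨j', hj', h1, h2⟩)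
          · exact Or.inl ((hmem x).mpr (Or.inl hx))
          · rcases List.mem_cons.mp hj' with rfl | hj''
            · exact Or.inl ((hmem x).mpr (Or.inr h2))
            · exact Or.inr ⟨j', hj'', h1, h2⟩
    · obtain ⟨Δ, heq2, hG3, hmem3⟩ := ih t V hG ht (fun j' hj' => hb j' (by simp [hj']))
      refine ⟨Δ, by rw [List.foldl_cons, if_neg hc]; exact heq2, hG3, ?_⟩
      intro x
      rw [hmem3 x]
      constructor
      · rintro (hx | ⟨j', hj', h1, h2⟩)
        · exact Or.inl hx
        · exact Or.inr ⟨j', by simp [hj'], h1, h2⟩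
      · rintro (hx | ⟨j', hj', h1, h2⟩)
        · exact Or.inl hx
        · rcases List.mem_cons.mp hj' with rfl | hj''
          · -- the guard failed: either the cell is not oil, or it is already in V
            rcases not_and_or.mp hc with h | h
            · exact absurd h1.2 h
            · have : (j', i) ∈ V := not_not.mp h
              exact Or.inl (pvMem_of_conn hG.2.2 this h2)
          · exact Or.inr ⟨j', hj'', h1, h2⟩

lemma pvAColumn_spec (land : List (List Int)) (i : Int) (hi : 0 ≤ i ∧ i < pvM land) :
    ∃ V, pvAColumn land i = ((V.length : Int), V) ∧
      pvGood land (pvN land) (pvM land) V ∧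
      (∀ x, x ∈ V ↔ pvCP land (pvN land) (pvM land) i x) := by
  obtain ⟨Δ, heq, hG, hmem⟩ := pvAColFold land i hi
    (PySem.List.pyRange 0 (PySem.List.len land) 1) 0 PySem.Set.empty
    ⟨List.nodup_nil, by simp [PySem.Set.empty], by intro x hx; simp [PySem.Set.empty] at hx⟩
    (by simp [PySem.Set.empty])
    (by
      intro j hj
      rw [PySem.List.mem_pyRange_one] at hj
      exact ⟨hj.1, by simpa [pvN] using hj.2⟩)
  refine ⟨Δ, ?_, by simpa [PySem.Set.empty] using hG, ?_⟩
  · rw [pvAColumn]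
    rw [heq]
    simp [PySem.Set.empty]
  · intro x
    have := hmem x
    simp only [PySem.Set.empty, List.nil_append, List.not_mem_nil, false_or] at this
    rw [this]
    constructor
    · rintro ⟨j, hj, h1, h2⟩
      exact ⟨(j, i), rfl, h1, h2⟩
    · rintro ⟨u, hu2, h1, h2⟩
      refine ⟨u.1, ?_, ?_, ?_⟩
      · rw [PySem.List.mem_pyRange_one]
        have h3 := h1.1
        rw [pvInG] at h3
        simp only [pvN, PySem.List.len] at h3 ⊢
        omega
      · rwa [show (u.1, i) = u from by rw [← hu2]]
      · rwa [show (u.1, i) = u from by rw [← hu2]]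
lemma pvBVisitFold (land : List (List Int)) (n m : Int) (c : Int × Int) :
    ∀ (ds : List (Int × Int)) (v : PySem.Set (Int × Int)) (q : List (Int × Int)),
      v.Nodup →
      ∃ E, ds.foldl (pvBVisit land n m c.1 c.2) (v, q) = (v ++ E, q ++ E) ∧
        (v ++ E).Nodup ∧ (∀ y ∈ E, pvP land n m y ∧ ∃ d ∈ ds, y = (c.1 + d.1, c.2 + d.2)) ∧
        (∀ d ∈ ds, pvP land n m (c.1 + d.1, c.2 + d.2) → (c.1 + d.1, c.2 + d.2) ∈ v ++ E) := by
  intro ds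
  induction ds with
  | nil =>
    intro v q hnd
    exact ⟨[], by simp, by simpa using hnd, by simp, by simp⟩
  | cons d ds ih =>
    intro v q hnd
    set nd : Int × Int := (c.1 + d.1, c.2 + d.2) with hndd
    by_cases hg : 0 ≤ nd.1 ∧ nd.1 < n ∧ 0 ≤ nd.2 ∧ nd.2 < m ∧ nd ∉ v ∧ pvCell land nd.1 nd.2 = 1
    · have hstep : pvBVisit land n m c.1 c.2 (v, q) d = (v ++ [nd], q ++ [nd]) := by
        simp only [pvBVisit, ← hndd]
        rw [if_pos hg]
        simp [PySem.Set.add_of_not_mem hg.2.2.2.2.1]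
      have hnd1 : (v ++ [nd]).Nodup := by
        refine List.Nodup.append hnd (List.nodup_singleton _) ?_
        intro x hx hy
        rw [List.mem_singleton] at hy
        subst hy
        exact hg.2.2.2.2.1 hx
      obtain ⟨E, heq, hnd2, hP, hcov⟩ := ih (v ++ [nd]) (q ++ [nd]) hnd1
      refine ⟨nd :: E, ?_, by simpa using hnd2, ?_, ?_⟩
      · rw [List.foldl_cons, hstep, heq]
        simp
      · intro y hy
        rcases List.mem_cons.mp hy with rfl | hy'
        · exact ⟨⟨⟨hg.1, hg.2.1, hg.2.2.1, hg.2.2.2.1⟩, hg.2.2.2.2.2⟩, d, by simp, hndd⟩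
        · obtain ⟨h1, d', hd', h2⟩ := hP y hy'
          exact ⟨h1, d', by simp [hd'], h2⟩
      · intro d' hd' hP'
        rcases List.mem_cons.mp hd' with rfl | hd''
        · simp [← hndd]
        · simpa using hcov d' hd'' hP'
    · have hstep : pvBVisit land n m c.1 c.2 (v, q) d = (v, q) := by
        simp only [pvBVisit, ← hndd]
        rw [if_neg hg]
      obtain ⟨E, heq, hnd2, hP, hcov⟩ := ih v q hnd
      refine ⟨E, by rw [List.foldl_cons, hstep]; exact heq, hnd2, ?_, ?_⟩
      · intro y hy
        obtain ⟨h1, d', hd', h2⟩ := hP y hy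
        exact ⟨h1, d', by simp [hd'], h2⟩
      · intro d' hd' hP'
        rcases List.mem_cons.mp hd' with rfl | hd''
        · by_cases hv : nd ∈ v
          · exact List.mem_append_left _ hv
          · exact absurd ⟨hP'.1.1, hP'.1.2.1, hP'.1.2.2.1, hP'.1.2.2.2, hv, hP'.2⟩ hg
        · exact hcov d' hd'' hP'

lemma pvBLoop_spec (land : List (List Int)) (n m : Int) (Q : Int × Int → Prop)
    (hQc : ∀ x y, Q x → pvNbr land n m x y → Q y) :
    ∀ (fuel : Nat) (seen : PySem.Set (Int × Int)) (stack cells : List (Int × Int)),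
      seen.Nodup → (∀ x ∈ stack, x ∈ seen) → (∀ x ∈ seen, pvP land n m x) →
      (∀ x ∈ seen, Q x) →
      (∀ x ∈ seen, x ∉ stack → ∀ y, pvNbr land n m x y → y ∈ seen) →
      stack.length + 2 * (n.toNat * m.toNat - seen.length) < fuel →
      ∃ Δ pops, pvBLoop land n m fuel seen stack cells = (seen ++ Δ, cells ++ pops) ∧
        pops.Perm (stack ++ Δ) ∧
        (seen ++ Δ).Nodup ∧ (∀ x ∈ Δ, pvP land n m x ∧ Q x) ∧
        pvClosed land n m (seen ++ Δ) := by
  intro fuel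
  induction fuel with
  | zero => intro seen stack cells _ _ _ _ _ hlt; omega
  | succ fuel ih =>
    intro seen stack cells hnd hqv hP hQ hcl hlt
    rcases List.eq_nil_or_concat stack with rfl | ⟨s', p, rfl⟩
    · refine ⟨[], [], ?_, by simp, by simpa using hnd, by simp, ?_⟩
      · rw [pvBLoop]
        simp [PySem.List.pop?]
      · intro x hx y hy
        simp only [List.append_nil] at hx ⊢
        exact hcl x hx (by simp) y hy
    · simp only [List.concat_eq_append] at hqv hcl hlt ⊢
      obtain ⟨E, heq, hndE, hPE, hcov⟩ := pvBVisitFold land n m p pvDirs seen s' hnd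
      have hpv : p ∈ seen := hqv p (by simp)
      have hPp : pvP land n m p := hP p hpv
      have hQp : Q p := hQ p hpv
      have hEfresh : ∀ y ∈ E, y ∉ seen := fun y hy hyv =>
        List.disjoint_of_nodup_append hndE hyv hy
      have hNbrE : ∀ y ∈ E, pvNbr land n m p y := by
        intro y hy
        obtain ⟨hPy, d, hd, rfl⟩ := (hPE y hy).imp_right id
        exact ⟨hPp, hPy, d, hd, rfl⟩
      have hQE : ∀ y ∈ E, Q y := fun y hy => hQc _ _ hQp (hNbrE y hy)
      have hlen : (seen ++ E).length ≤ n.toNat * m.toNat := by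
        refine pvLength_le_grid hndE ?_
        intro x hx
        rcases List.mem_append.mp hx with hx | hx
        · exact (hP x hx).1
        · exact (hPE x hx).1.1
      have hrec := ih (seen ++ E) (s' ++ E) (cells ++ [p])
        hndE
        (by
          intro x hx
          rcases List.mem_append.mp hx with hx | hx
          · exact List.mem_append_left _ (hqv x (by simp [hx]))
          · exact List.mem_append_right _ hx)
        (by
          intro x hx
          rcases List.mem_append.mp hx with hx | hx
          · exact hP x hx
          · exact (hPE x hx).1)
        (by
          intro x hx
          rcases List.mem_append.mp hx with hx | hx
          · exact hQ x hx
          · exact hQE x hx)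
        (by
          intro x hx hxq y hy
          rcases List.mem_append.mp hx with hx | hx
          · by_cases hxc : x = p
            · subst hxc
              obtain ⟨_, hPy, d, hd, rfl⟩ := hy
              exact hcov d hd hPy
            · have hxs : x ∉ s' := fun h => hxq (List.mem_append_left _ h)
              have : x ∉ s' ++ [p] := by
                intro h
                rcases List.mem_append.mp h with h | h
                · exact hxs h
                · exact hxc (List.mem_singleton.mp h)
              exact List.mem_append_left _ (hcl x hx this y hy)
          · exact absurd (List.mem_append_right s' hx) hxq)
        (by
          simp only [List.length_append, List.length_singleton] at hlt hlen ⊢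
          omega)
      obtain ⟨Δ, pops, heq2, hperm, hnd3, hPQ3, hcl3⟩ := hrec
      refine ⟨E ++ Δ, p :: pops, ?_, ?_, by simpa [List.append_assoc] using hnd3, ?_, ?_⟩
      · rw [pvBLoop]
        rw [PySem.List.pop?_last]
        simp only [heq]
        rw [heq2]
        refine Prod.ext (by simp) (by simp)
      · refine (hperm.cons p).trans ?_
        have h2 := (List.perm_middle (a := p) (l₁ := s') (l₂ := E ++ Δ)).symm
        simpa [List.append_assoc] using h2
      · intro x hx
        rcases List.mem_append.mp hx with hx | hx
        · exact ⟨(hPE x hx).1, hQE x hx⟩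
        · exact hPQ3 x hx
      · intro x hx y hy
        rw [← List.append_assoc] at hx ⊢
        exact hcl3 x hx y hy
lemma pvFlood_spec (land : List (List Int)) (seen : PySem.Set (Int × Int)) (r c : Int)
    (hG : pvGood land (pvN land) (pvM land) seen)
    (hp : pvP land (pvN land) (pvM land) (r, c)) (hnv : (r, c) ∉ seen) :
    ∃ K cells, pvFlood land (pvN land) (pvM land) r c seen = (seen ++ K, cells) ∧
      cells.Perm K ∧
      pvGood land (pvN land) (pvM land) (seen ++ K) ∧
      (∀ x, x ∈ seen ++ K ↔ x ∈ seen ∨ pvConn land (pvN land) (pvM land) (r, c) x) ∧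
      (∀ x, x ∈ K ↔ pvConn land (pvN land) (pvM land) (r, c) x) := by
  obtain ⟨hnd, hP, hcl⟩ := hG
  have hadd : PySem.Set.add seen (r, c) = seen ++ [(r, c)] := PySem.Set.add_of_not_mem hnv
  have hnd1 : (seen ++ [(r, c)]).Nodup := by
    refine List.Nodup.append hnd (List.nodup_singleton _) ?_
    intro x hx hy
    rw [List.mem_singleton] at hy
    subst hy
    exact hnv hx
  obtain ⟨Δ, pops, heq, hperm, hnd2, hPQ, hcl2⟩ :=
    pvBLoop_spec land (pvN land) (pvM land)
      (fun x => x ∈ seen ∨ pvConn land (pvN land) (pvM land) (r, c) x)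
      (by
        rintro x y (hx | hx) hnb
        · exact Or.inl (hcl x hx y hnb)
        · exact Or.inr (hx.tail hnb))
      (pvFuel land) (seen ++ [(r, c)]) [(r, c)] []
      hnd1
      (by intro x hx; simp at hx; simp [hx])
      (by
        intro x hx
        rcases List.mem_append.mp hx with hx | hx
        · exact hP x hx
        · rw [List.mem_singleton] at hx; subst hx; exact hp)
      (by
        intro x hx
        rcases List.mem_append.mp hx with hx | hx
        · exact Or.inl hx
        · rw [List.mem_singleton] at hx; subst hx
          exact Or.inr Relation.ReflTransGen.refl)
      (by
        intro x hx hxq y hy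
        rcases List.mem_append.mp hx with hx | hx
        · exact List.mem_append_left _ (hcl x hx y hy)
        · exact absurd (List.mem_singleton.mpr (List.mem_singleton.mp hx)) hxq)
      (by
        have h1 := pvFuel_big land
        have h2 : (seen ++ [(r, c)]).length ≤ (pvN land).toNat * (pvM land).toNat := by
          refine pvLength_le_grid hnd1 ?_
          intro q hq
          rcases List.mem_append.mp hq with hq | hq
          · exact (hP q hq).1
          · rw [List.mem_singleton] at hq; subst hq; exact hp.1
        simp only [List.length_singleton]
        omega)
  have hKchar : ∀ x, x ∈ (r, c) :: Δ ↔ pvConn land (pvN land) (pvM land) (r, c) x := by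
    intro x
    constructor
    · intro hx
      rcases List.mem_cons.mp hx with rfl | hx
      · exact Relation.ReflTransGen.refl
      · rcases (hPQ x hx).2 with h | h
        · exact absurd h (by
            intro hxs
            have := List.disjoint_of_nodup_append (by simpa [List.append_assoc] using hnd2)
            exact this hxs (by simp [hx]))
        · exact h
    · intro hconn
      have hmem : x ∈ seen ++ [(r, c)] ++ Δ :=
        pvMem_of_conn hcl2 (by simp) hconn
      have hxs : x ∉ seen := by
        intro hxs
        exact hnv (pvMem_of_conn hcl hxs (pvConn_symm land _ _ hconn))
      rcases List.mem_append.mp hmem with hm | hm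
      · rcases List.mem_append.mp hm with hm | hm
        · exact absurd hm hxs
        · exact List.mem_cons.mpr (Or.inl (List.mem_singleton.mp hm))
      · exact List.mem_cons.mpr (Or.inr hm)
  refine ⟨(r, c) :: Δ, pops, ?_, ?_, ?_, ?_, hKchar⟩
  · have heq' : pvBLoop land (PySem.List.len land)
        (PySem.List.len (PySem.List.pyGetD land 0 [])) (pvFuel land)
        (seen ++ [(r, c)]) [(r, c)] [] = (seen ++ [(r, c)] ++ Δ, [] ++ pops) := heq
    show pvFlood land (pvN land) (pvM land) r c seen = _
    rw [pvFlood]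
    have : pvFlood land (pvN land) (pvM land) r c seen =
        (seen ++ [(r, c)] ++ Δ, [] ++ pops) := by
      rw [pvFlood, hadd]
      exact heq
    rw [pvFlood] at this
    rw [this]
    simp [List.append_assoc]
  · refine hperm.trans ?_
    simp
  · refine ⟨by simpa [List.append_assoc] using hnd2, ?_, ?_⟩
    · intro x hx
      rcases List.mem_append.mp hx with hx | hx
      · exact hP x hx
      · rcases List.mem_cons.mp hx with rfl | hx
        · exact hp
        · exact (hPQ x hx).1
    · intro x hx y hy
      have hx' : x ∈ seen ++ [(r, c)] ++ Δ := by simpa [List.append_assoc] using hx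
      have := hcl2 x hx' y hy
      simpa [List.append_assoc] using this
  · intro x
    constructor
    · intro hx
      rcases List.mem_append.mp hx with hx | hx
      · exact Or.inl hx
      · exact Or.inr ((hKchar x).mp hx)
    · rintro (hx | hx)
      · exact List.mem_append_left _ hx
      · exact List.mem_append_right _ ((hKchar x).mpr hx)
def pvColSet (land : List (List Int)) (n m : Int) (seen : List (Int × Int)) (i : Int) :
    Set (Int × Int) :=
  {x | x ∈ seen ∧ ∃ u : Int × Int, u.2 = i ∧ u ∈ seen ∧ pvConn land n m u x}

lemma pvNcard_list {α : Type} [DecidableEq α] (l : List α) (h : l.Nodup) :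
    {x | x ∈ l}.ncard = l.length := by
  rw [← List.coe_toFinset, Set.ncard_coe_finset]
  exact List.toFinset_card_of_nodup h

lemma pvColSet_finite (land : List (List Int)) (n m : Int) (seen : List (Int × Int)) (i : Int) :
    (pvColSet land n m seen i).Finite :=
  Set.Finite.subset (List.finite_toSet seen) (fun _ hx => hx.1)

-- adding a whole fresh component K to a closed seen set splits each column set
lemma pvColSet_split (land : List (List Int)) (n m : Int) (seen K : List (Int × Int))
    (s : Int × Int)
    (hcl : pvClosed land n m seen)
    (hK : ∀ x, x ∈ K ↔ pvConn land n m s x)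
    (hdisj : ∀ x ∈ K, x ∉ seen) (k : Int) :
    pvColSet land n m (seen ++ K) k =
      pvColSet land n m seen k ∪ (if ∃ u ∈ K, u.2 = k then {x | x ∈ K} else ∅) := by
  ext x
  simp only [pvColSet, Set.mem_union, Set.mem_setOf_eq, List.mem_append]
  constructor
  · rintro ⟨hx, u, hu2, hu, hconn⟩
    rcases hx with hx | hx
    · rcases hu with hu | hu
      · exact Or.inl ⟨hx, u, hu2, hu, hconn⟩
      · -- u in the new component, x in the old seen: impossible
        exfalso
        have : u ∈ seen := pvMem_of_conn hcl hx (pvConn_symm land n m hconn)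
        exact hdisj u hu this
    · rcases hu with hu | hu
      · exfalso
        exact hdisj x hx (pvMem_of_conn hcl hu hconn)
      · refine Or.inr ?_
        rw [if_pos ⟨u, hu, hu2⟩]
        exact hx
  · rintro (⟨hx, u, hu2, hu, hconn⟩ | hx)
    · exact ⟨Or.inl hx, u, hu2, Or.inl hu, hconn⟩
    · by_cases hm : ∃ u ∈ K, u.2 = k
      · rw [if_pos hm] at hx
        obtain ⟨u, hu, hu2⟩ := hm
        refine ⟨Or.inr hx, u, hu2, Or.inr hu, ?_⟩
        exact Relation.ReflTransGen.trans
          (pvConn_symm land n m ((hK u).mp hu)) ((hK x).mp hx)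
      · rw [if_neg hm] at hx
        exact absurd hx (Set.notMem_empty x)

lemma pvColSet_split_ncard (land : List (List Int)) (n m : Int) (seen K : List (Int × Int))
    (s : Int × Int)
    (hcl : pvClosed land n m seen)
    (hK : ∀ x, x ∈ K ↔ pvConn land n m s x)
    (hndK : K.Nodup)
    (hdisj : ∀ x ∈ K, x ∉ seen) (k : Int) :
    (pvColSet land n m (seen ++ K) k).ncard =
      (pvColSet land n m seen k).ncard + (if ∃ u ∈ K, u.2 = k then K.length else 0) := by
  rw [pvColSet_split land n m seen K s hcl hK hdisj k]
  by_cases hm : ∃ u ∈ K, u.2 = k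
  · rw [if_pos hm, if_pos hm]
    rw [Set.ncard_union_eq ?_ (pvColSet_finite land n m seen k) (List.finite_toSet K)]
    · rw [pvNcard_list K hndK]
    · rw [Set.disjoint_left]
      intro x hx hx'
      exact hdisj x hx' hx.1
  · rw [if_neg hm, if_neg hm]
    simp

-- the `for ci in set(...): col[ci] += size` loop
lemma pvColAdd (sz : Int) :
    ∀ (C : List Int) (col : List Int), C.Nodup →
      (∀ ci ∈ C, 0 ≤ ci ∧ ci < (col.length : Int)) →
      (C.foldl (fun col ci =>
          PySem.List.pySetD col ci (PySem.List.pyGetD col ci 0 + sz)) col).length = col.length ∧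
      ∀ k : Nat, k < col.length →
        (C.foldl (fun col ci =>
            PySem.List.pySetD col ci (PySem.List.pyGetD col ci 0 + sz)) col).getD k 0 =
          col.getD k 0 + (if (k : Int) ∈ C then sz else 0) := by
  intro C
  induction C with
  | nil => intro col _ _; simp
  | cons ci C ih =>
    intro col hnd hb
    have hci := hb ci (by simp)
    have hset : PySem.List.pySetD col ci (PySem.List.pyGetD col ci 0 + sz) =
        col.set ci.toNat (PySem.List.pyGetD col ci 0 + sz) :=
      PySem.List.pySetD_of_nonneg col _ hci.1
    have hlen1 : (col.set ci.toNat (PySem.List.pyGetD col ci 0 + sz)).length = col.length := by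
      simp
    obtain ⟨hlen2, hval2⟩ := ih (col.set ci.toNat (PySem.List.pyGetD col ci 0 + sz))
      (List.Nodup.of_cons hnd)
      (by
        intro c hc
        have := hb c (by simp [hc])
        simpa [hlen1] using this)
    constructor
    · rw [List.foldl_cons, hset, hlen2, hlen1]
    · intro k hk
      rw [List.foldl_cons, hset, hval2 k (by omega)]
      have hgetset : (col.set ci.toNat (PySem.List.pyGetD col ci 0 + sz)).getD k 0 =
          if ci.toNat = k then PySem.List.pyGetD col ci 0 + sz else col.getD k 0 := by
        rcases eq_or_ne ci.toNat k with rfl | hne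
        · rw [if_pos rfl, List.getD, List.getElem?_set, if_pos rfl, if_pos hk]
          rfl
        · rw [if_neg hne, List.getD, List.getD, List.getElem?_set, if_neg hne]
      rcases eq_or_ne ci.toNat k with heq | hne
      · have hkc : (k : Int) = ci := by omega
        have hknotC : (k : Int) ∉ C := by
          rw [hkc]
          exact (List.nodup_cons.mp hnd).1
        rw [hgetset, if_pos heq, if_neg hknotC, if_pos (by simp [hkc])]
        have : PySem.List.pyGetD col ci 0 = col.getD k 0 := by
          rw [PySem.List.pyGetD_of_nonneg _ _ hci.1, heq]
        rw [this]
        ring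
      · rw [hgetset, if_neg hne]
        by_cases hkC : (k : Int) ∈ C
        · rw [if_pos hkC, if_pos (by simp [hkC])]
        · rw [if_neg hkC, if_neg (by
            intro hmem
            rcases List.mem_cons.mp hmem with h | h
            · omega
            · exact hkC h)]
lemma pvM_nonneg (land : List (List Int)) : 0 ≤ pvM land := by
  simp [pvM, PySem.List.len]

lemma pvBCellFold (land : List (List Int)) :
    ∀ (ps : List (Int × Int)) (seen : PySem.Set (Int × Int)) (col : List Int),
      pvGood land (pvN land) (pvM land) seen →
      col.length = (pvM land).toNat →
      (∀ k : Nat, k < col.length →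
        col.getD k 0 = ((pvColSet land (pvN land) (pvM land) seen (k : Int)).ncard : Int)) →
      (∀ p ∈ ps, pvInG (pvN land) (pvM land) p) →
      ∃ seen' col',
        ps.foldl (fun st p => pvBCellStep land (pvN land) (pvM land) st p.1 p.2)
            (seen, col) = (seen', col') ∧
        pvGood land (pvN land) (pvM land) seen' ∧
        col'.length = col.length ∧
        (∀ k : Nat, k < col.length →
          col'.getD k 0 = ((pvColSet land (pvN land) (pvM land) seen' (k : Int)).ncard : Int)) ∧
        (∀ x, x ∈ seen' ↔ x ∈ seen ∨ ∃ p ∈ ps,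
          pvP land (pvN land) (pvM land) p ∧ pvConn land (pvN land) (pvM land) p x) := by
  intro ps
  induction ps with
  | nil =>
    intro seen col hG hlen hinv _
    exact ⟨seen, col, by simp, hG, rfl, hinv, by simp⟩
  | cons p ps ih =>
    intro seen col hG hlen hinv hb
    have hbp := hb p (by simp)
    by_cases hc : pvCell land p.1 p.2 = 1 ∧ (p.1, p.2) ∉ seen
    · have hp : pvP land (pvN land) (pvM land) (p.1, p.2) := ⟨by simpa using hbp, hc.1⟩
      obtain ⟨K, cells, heqFl, hperm, hG2, hmemS, hKchar⟩ :=
        pvFlood_spec land seen p.1 p.2 hG hp hc.2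
      have hndK : K.Nodup := List.Nodup.of_append_right hG2.1
      have hdisj : ∀ x ∈ K, x ∉ seen :=
        fun x hx hx' => List.disjoint_of_nodup_append hG2.1 hx' hx
      have hmemcols : ∀ ci : Int,
          ci ∈ PySem.Set.ofList (cells.map (fun u => u.2)) ↔ ∃ u ∈ K, u.2 = ci := by
        intro ci
        rw [PySem.Set.mem_ofList]
        simp only [List.mem_map]
        constructor
        · rintro ⟨u, hu, rfl⟩
          exact ⟨u, hperm.mem_iff.mp hu, rfl⟩
        · rintro ⟨u, hu, rfl⟩
          exact ⟨u, hperm.mem_iff.mpr hu, rfl⟩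
      have hKP : ∀ u ∈ K, pvP land (pvN land) (pvM land) u := by
        intro u hu
        exact pvP_of_conn ((hKchar u).mp hu) hp
      obtain ⟨hlen1, hval1⟩ := pvColAdd (cells.length : Int)
        (PySem.Set.ofList (cells.map (fun u => u.2))) col
        (PySem.Set.nodup_ofList _)
        (by
          intro ci hci
          obtain ⟨u, hu, rfl⟩ := (hmemcols ci).mp hci
          have := (hKP u hu).1
          rw [pvInG] at this
          have hm0 := pvM_nonneg land
          constructor
          · exact this.2.2.1
          · rw [hlen]
            omega)
      set col₁ := (PySem.Set.ofList (cells.map (fun u => u.2))).foldl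
        (fun col ci => PySem.List.pySetD col ci (PySem.List.pyGetD col ci 0 + (cells.length : Int))) col with hcol₁
      have hinv1 : ∀ k : Nat, k < col₁.length →
          col₁.getD k 0 = ((pvColSet land (pvN land) (pvM land) (seen ++ K) (k : Int)).ncard : Int) := by
        intro k hk
        rw [hlen1] at hk
        rw [hval1 k hk, hinv k hk]
        rw [pvColSet_split_ncard land (pvN land) (pvM land) seen K (p.1, p.2)
          hG.2.2 hKchar hndK hdisj (k : Int)]
        rw [hperm.length_eq]
        by_cases hm : ∃ u ∈ K, u.2 = (k : Int)
        · rw [if_pos ((hmemcols (k : Int)).mpr hm), if_pos hm]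
          push_cast
          ring
        · rw [if_neg (fun h => hm ((hmemcols (k : Int)).mp h)), if_neg hm]
          simp
      obtain ⟨seen', col', heq2, hG3, hlen3, hinv3, hmem3⟩ := ih (seen ++ K) col₁ hG2
        (by rw [hlen1, hlen]) (by rw [hlen1] at hinv1 ⊢; exact hinv1)
        (fun q hq => hb q (by simp [hq]))
      refine ⟨seen', col', ?_, hG3, by rw [hlen3, hlen1], by rw [hlen1] at hinv3; exact hinv3, ?_⟩
      · rw [List.foldl_cons, ← heq2]
        congr 1
        show pvBCellStep land (pvN land) (pvM land) (seen, col) p.1 p.2 = (seen ++ K, col₁)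
        rw [pvBCellStep, if_pos hc]
        simp only [heqFl]
        rfl
      · intro x
        rw [hmem3 x]
        constructor
        · rintro (hx | ⟨q, hq, h1, h2⟩)
          · rcases (hmemS x).mp hx with hx | hx
            · exact Or.inl hx
            · exact Or.inr ⟨p, by simp, by simpa using hp, by simpa using hx⟩
          · exact Or.inr ⟨q, by simp [hq], h1, h2⟩
        · rintro (hx | ⟨q, hq, h1, h2⟩)
          · exact Or.inl ((hmemS x).mpr (Or.inl hx))
          · rcases List.mem_cons.mp hq with rfl | hq'
            · exact Or.inl ((hmemS x).mpr (Or.inr (by simpa using h2)))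
            · exact Or.inr ⟨q, hq', h1, h2⟩
    · obtain ⟨seen', col', heq2, hG3, hlen3, hinv3, hmem3⟩ := ih seen col hG hlen hinv
        (fun q hq => hb q (by simp [hq]))
      refine ⟨seen', col', ?_, hG3, hlen3, hinv3, ?_⟩
      · rw [List.foldl_cons, ← heq2]
        congr 1
        rw [pvBCellStep, if_neg hc]
      · intro x
        rw [hmem3 x]
        constructor
        · rintro (hx | ⟨q, hq, h1, h2⟩)
          · exact Or.inl hx
          · exact Or.inr ⟨q, by simp [hq], h1, h2⟩
        · rintro (hx | ⟨q, hq, h1, h2⟩)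
          · exact Or.inl hx
          · rcases List.mem_cons.mp hq with rfl | hq'
            · rcases not_and_or.mp hc with h | h
              · exact absurd h1.2 (by simpa using h)
              · have hqin : (q.1, q.2) ∈ seen := not_not.mp h
                exact Or.inl (pvMem_of_conn hG.2.2 (by simpa using hqin) h2)
            · exact Or.inr ⟨q, hq', h1, h2⟩
lemma pvMaxD_eq_foldl (l : List Int) (h : ∀ x ∈ l, 0 ≤ x) :
    PySem.List.maxD l (fun x => x) 0 = l.foldl max 0 := by
  match l with
  | [] => rfl
  | x :: l =>
    have hx : 0 ≤ x := h x (by simp)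
    show (PySem.List.max? (x :: l) (fun v => v)).getD 0 = _
    rw [PySem.List.max?_id_cons]
    simp only [Option.getD_some, List.foldl_cons, max_eq_right hx]
lemma pvMain (land : List (List Int)) : solution land = solution_alt land := by
  -- B: run the component-labelling fold over the row-major list of all cells
  have hpairs : ∀ p ∈ (PySem.List.pyRange 0 (pvN land) 1).flatMap
      (fun r => (PySem.List.pyRange 0 (pvM land) 1).map (fun c => (r, c))),
      pvInG (pvN land) (pvM land) p := by
    intro p hp
    rw [List.mem_flatMap] at hp
    obtain ⟨r, hr, hp⟩ := hp
    rw [List.mem_map] at hp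
    obtain ⟨c, hc, rfl⟩ := hp
    rw [PySem.List.mem_pyRange_one] at hr hc
    exact ⟨hr.1, hr.2, hc.1, hc.2⟩
  obtain ⟨seen', col', heq, hG', hlen', hinv', hmem'⟩ :=
    pvBCellFold land
      ((PySem.List.pyRange 0 (pvN land) 1).flatMap
        (fun r => (PySem.List.pyRange 0 (pvM land) 1).map (fun c => (r, c))))
      PySem.Set.empty (List.replicate (pvM land).toNat 0)
      ⟨List.nodup_nil, by simp [PySem.Set.empty], by intro x hx; simp [PySem.Set.empty] at hx⟩
      (by simp)
      (by
        intro k hk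
        rw [List.length_replicate] at hk
        rw [List.getD_replicate 0 hk]
        have : pvColSet land (pvN land) (pvM land) PySem.Set.empty (k : Int) = ∅ := by
          ext x
          simp [pvColSet, PySem.Set.empty]
        rw [this, Set.ncard_empty]
        simp)
      hpairs
  rw [List.length_replicate] at hlen' hinv'
  -- the final seen set is exactly the set of oil cells
  have hseenP : ∀ x, x ∈ seen' ↔ pvP land (pvN land) (pvM land) x := by
    intro x
    rw [hmem' x]
    constructor
    · rintro (hx | ⟨p, _, h1, h2⟩)
      · simp [PySem.Set.empty] at hx
      · exact pvP_of_conn h2 h1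
    · intro hx
      refine Or.inr ⟨(x.1, x.2), ?_, by simpa using hx, Relation.ReflTransGen.refl⟩
      rw [List.mem_flatMap]
      have hb := hx.1
      rw [pvInG] at hb
      refine ⟨x.1, by rw [PySem.List.mem_pyRange_one]; exact ⟨hb.1, hb.2.1⟩, ?_⟩
      rw [List.mem_map]
      exact ⟨x.2, by rw [PySem.List.mem_pyRange_one]; exact ⟨hb.2.2.1, hb.2.2.2⟩, rfl⟩
  -- each accumulated column value is the size of the column reach set
  have hColVal : ∀ k : Nat, k < (pvM land).toNat →
      col'.getD k 0 = (({x | pvCP land (pvN land) (pvM land) (k : Int) x}.ncard : Nat) : Int) := by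
    intro k hk
    rw [hinv' k hk]
    congr 2
    ext x
    simp only [pvColSet, pvCP, Set.mem_setOf_eq]
    constructor
    · rintro ⟨_, u, hu2, hu, hconn⟩
      exact ⟨u, hu2, (hseenP u).mp hu, hconn⟩
    · rintro ⟨u, hu2, hPu, hconn⟩
      exact ⟨(hseenP x).mpr (pvP_of_conn hconn hPu), u, hu2, (hseenP u).mpr hPu, hconn⟩
  -- A: each column total is the size of the same set
  have hA : ∀ i : Int, 0 ≤ i → i < pvM land →
      (pvAColumn land i).1 = (({x | pvCP land (pvN land) (pvM land) i x}.ncard : Nat) : Int) := by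
    intro i h1 h2
    obtain ⟨V, heqV, hGV, hmemV⟩ := pvAColumn_spec land i ⟨h1, h2⟩
    rw [heqV]
    have : {x | pvCP land (pvN land) (pvM land) i x} = {x | x ∈ V} := by
      ext x
      simp only [Set.mem_setOf_eq]
      exact (hmemV x).symm
    rw [this, pvNcard_list V hGV.1]
  -- connect col' entries with A's totals, then fold
  have hclen : (col'.length : Int) = pvM land := by
    rw [hlen']
    exact Int.toNat_of_nonneg (pvM_nonneg land)
  have hsolA : solution land =
      (PySem.List.pyRange 0 (pvM land) 1).foldl
        (fun answer i => max answer (pvAColumn land i).1) 0 := rfl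
  have hsolB : solution_alt land = PySem.List.maxD col' (fun x => x) 0 := by
    show PySem.List.maxD
      ((PySem.List.pyRange 0 (pvN land) 1).foldl (fun st r =>
        (PySem.List.pyRange 0 (pvM land) 1).foldl
          (fun st c => pvBCellStep land (pvN land) (pvM land) st r c) st)
        (PySem.Set.empty, List.replicate (pvM land).toNat 0)).2 (fun x => x) 0 = _
    rw [show (PySem.List.pyRange 0 (pvN land) 1).foldl (fun st r =>
        (PySem.List.pyRange 0 (pvM land) 1).foldl
          (fun st c => pvBCellStep land (pvN land) (pvM land) st r c) st)
        (PySem.Set.empty, List.replicate (pvM land).toNat 0) = (seen', col') from by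
      rw [← heq, List.foldl_flatMap]
      simp only [List.foldl_map]]
  rw [hsolA, hsolB]
  rw [PySem.List.foldl_congr_mem _ _ (fun answer i => max answer (PySem.List.pyGetD col' i 0)) _
    (by
      intro acc i hi
      rw [PySem.List.mem_pyRange_one] at hi
      congr 1
      rw [hA i hi.1 hi.2]
      rw [PySem.List.pyGetD_of_nonneg _ _ hi.1]
      rw [hColVal i.toNat (by omega)]
      rw [show ((i.toNat : Int)) = i from by omega])]
  rw [show (PySem.List.pyRange 0 (pvM land) 1) = PySem.List.pyRange 0 (col'.length : Int) 1 from by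
    rw [hclen]]
  rw [PySem.List.foldl_pyRange_zero_pyGetD' col' 0 max 0]
  rw [pvMaxD_eq_foldl col' (by
    intro x hx
    rw [List.mem_iff_getElem] at hx
    obtain ⟨k, hk, rfl⟩ := hx
    rw [← List.getD_eq_getElem col' 0 hk]
    rw [hColVal k (by omega)]
    positivity)]

-- ===== VERDICT (by name: the statement is the Claim_ definition above) =====
theorem solution_spec : Claim_equal_solution := by
  intro land _hdom _hpre
  unfold Spec_solution
  exact pvMain land
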